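-- pv_equiv track=rewrite | github.com/sfr9802/RAG_Project | rag/app/app/scripts/rag_optuna_tune_v2.py | _split_folds
-- ===== SOURCE A (Python) =====
-- from typing import Dict, Any, List, Tuple, Optional
--
-- def _split_folds(rows: List[Tuple[str, List[str]]], folds: int) -> List[List[Tuple[str, List[str]]]]:
--     """Deterministic split into folds (contiguous blocks)."""
--     n = len(rows)
--     if folds <= 1 or n == 0:
--         return [rows]
--     fold_size = max(1, n // folds)
--     out: List[List[Tuple[str, List[str]]]] = []
--     for i in range(folds):
--         s = i * fold_size
--         e = (i + 1) * fold_size if i < folds - 1 else n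
--         out.append(rows[s:e])
--     return out
-- ===== SOURCE B (Python) =====
-- from typing import Dict, Any, List, Tuple, Optional
--
-- def _split_folds(rows: List[Tuple[str, List[str]]], folds: int) -> List[List[Tuple[str, List[str]]]]:
--     """Deterministic split into folds (contiguous blocks): peel fixed-size
--     chunks off the front instead of computing absolute slice boundaries."""
--     n = len(rows)
--     if folds <= 1 or n == 0:
--         return [rows]
--     fold_size = max(1, n // folds)
--     out: List[List[Tuple[str, List[str]]]] = []
--     rest = rows
--     for _ in range(folds - 1):
--         out.append(rest[:fold_size])
--         rest = rest[fold_size:]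
--     out.append(rest)
--     return out
-- ===== Notes on version B (the rewrite author's own statement) =====
-- stated objective: alternative
-- what changed: Replaces absolute start/end boundary arithmetic (s=i*fold_size, e=(i+1)*fold_size with a special-cased last index) by peeling fold_size-element chunks off the front of a shrinking remainder list, with the final remainder appended as the last fold.
import Mathlib
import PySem

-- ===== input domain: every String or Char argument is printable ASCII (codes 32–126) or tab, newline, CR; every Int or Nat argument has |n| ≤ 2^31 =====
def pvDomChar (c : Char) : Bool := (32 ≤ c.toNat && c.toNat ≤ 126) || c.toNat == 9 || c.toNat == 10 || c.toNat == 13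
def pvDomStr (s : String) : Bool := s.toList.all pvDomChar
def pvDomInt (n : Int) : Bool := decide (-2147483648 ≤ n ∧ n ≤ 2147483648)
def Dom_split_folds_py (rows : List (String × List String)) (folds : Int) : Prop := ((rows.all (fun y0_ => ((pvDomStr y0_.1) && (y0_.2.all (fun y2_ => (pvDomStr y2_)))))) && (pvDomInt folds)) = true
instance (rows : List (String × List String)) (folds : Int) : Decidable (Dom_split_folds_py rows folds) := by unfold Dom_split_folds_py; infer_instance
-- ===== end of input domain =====

-- B peels fold_size-element chunks off the front of a shrinking remainder instead of
-- computing absolute start/end slice boundaries; same cost, alternative decomposition.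

-- ===== PORT A =====
def split_folds_py (rows : List (String × List String)) (folds : Int) : List (List (String × List String)) :=
  let n : Int := (rows.length : Int)
  if folds ≤ 1 ∨ n = 0 then [rows]
  else
    let fold_size : Int := max 1 (PySem.Int.floordiv n folds)
    (PySem.List.pyRange 0 folds 1).foldl (fun out i =>
      let s := i * fold_size
      let e := if i < folds - 1 then (i + 1) * fold_size else n
      out ++ [PySem.List.slice rows (some s) (some e)]) []

-- ===== PORT B =====
def split_folds_py_alt (rows : List (String × List String)) (folds : Int) : List (List (String × List String)) :=
  let n : Int := (rows.length : Int)
  if folds ≤ 1 ∨ n = 0 then [rows]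
  else
    let fold_size : Int := max 1 (PySem.Int.floordiv n folds)
    let st := (PySem.List.pyRange 0 (folds - 1) 1).foldl
      (fun (st : List (List (String × List String)) × List (String × List String)) _ =>
        (st.1 ++ [PySem.List.slice st.2 none (some fold_size)],
         PySem.List.slice st.2 (some fold_size) none))
      ([], rows)
    st.1 ++ [st.2]

-- ===== PRECONDITION & SPEC =====
def Spec_split_folds_py (rows : List (String × List String)) (folds : Int) (out : List (List (String × List String))) : Prop := out = split_folds_py_alt rows folds
instance (rows : List (String × List String)) (folds : Int) (out : List (List (String × List String))) : Decidable (Spec_split_folds_py rows folds out) := by unfold Spec_split_folds_py; infer_instance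

-- ===== CLAIM (what is proved, stated in full; the proofs are below) =====
def Claim_equal_split_folds_py : Prop := ∀ (rows : List (String × List String)) (folds : Int), Dom_split_folds_py rows folds → Spec_split_folds_py rows folds (split_folds_py rows folds)

-- ===== LEMMAS AND PROOFS =====

-- B's peeling loop, characterised: after k steps the accumulator holds the k chunks
-- (rest.drop (i*fs)).take fs and the remainder is rest.drop (k*fs).
theorem pv_peel {α : Type} (fs : Nat) (k : Nat) (rest : List α) (acc : List (List α)) :
    (List.range k).foldl (fun st (_ : Nat) => (st.1 ++ [st.2.take fs], st.2.drop fs)) (acc, rest)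
    = (acc ++ (List.range k).map (fun i => (rest.drop (i * fs)).take fs), rest.drop (k * fs)) := by
  induction k with
  | zero => simp
  | succ k ih =>
    rw [List.range_succ, List.foldl_append, ih]
    simp [List.drop_drop, Nat.succ_mul]

theorem pv_main (rows : List (String × List String)) (folds : Int)
    (h1 : 1 < folds) (h2 : rows ≠ []) :
    split_folds_py rows folds = split_folds_py_alt rows folds := by
  have hcond : ¬ (folds ≤ 1 ∨ (rows.length : Int) = 0) := by
    push Not
    constructor
    · omega
    · exact_mod_cast fun h => h2 (List.length_eq_zero_iff.mp (by exact_mod_cast h))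
  -- abbreviations
  set fs : Int := max 1 (PySem.Int.floordiv (rows.length : Int) folds) with hfs_def
  have hfs1 : 1 ≤ fs := le_max_left _ _
  obtain ⟨fsN, hfsN⟩ : ∃ m : Nat, fs = (m : Int) := ⟨fs.toNat, (Int.toNat_of_nonneg (by omega)).symm⟩
  obtain ⟨fN, hfN⟩ : ∃ m : Nat, folds = (m : Int) := ⟨folds.toNat, (Int.toNat_of_nonneg (by omega)).symm⟩
  have hfN2 : 2 ≤ fN := by omega
  unfold split_folds_py split_folds_py_alt
  simp only [if_neg hcond]
  rw [← hfs_def]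
  -- A side: the append-loop is a map over the range
  rw [PySem.List.foldl_append_singleton_eq_map]
  -- B side: convert pyRange to List.range, then apply pv_peel
  have hbr : folds - 1 - 0 = ((fN - 1 : Nat) : Int) := by omega
  rw [PySem.List.pyRange_one 0 (folds - 1), hbr, Int.toNat_natCast, List.foldl_map]
  rw [show (fun (st : List (List (String × List String)) × List (String × List String)) (_ : Nat) =>
        (st.1 ++ [PySem.List.slice st.2 none (some fs)], PySem.List.slice st.2 (some fs) none))
      = (fun st (_ : Nat) => (st.1 ++ [st.2.take fsN], st.2.drop fsN)) from by
        funext st k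
        rw [hfsN, PySem.List.slice_to_natCast, PySem.List.slice_from_natCast]]
  rw [pv_peel]
  -- A side: convert pyRange to List.range and split off the last index
  rw [PySem.List.pyRange_one 0 folds]
  have hb0 : folds - 0 = ((fN : Nat) : Int) := by omega
  rw [hb0, Int.toNat_natCast, List.map_map]
  have hsplit : fN = (fN - 1) + 1 := by omega
  rw [hsplit, List.range_succ, List.map_append, List.map_singleton]
  simp only [List.nil_append, Function.comp]
  congr 1
  · -- the first fN-1 blocks
    apply List.map_congr_left
    intro k hk
    simp only [Function.comp_apply]
    have hklt : k < fN - 1 := List.mem_range.mp hk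
    have hlt : (0 : Int) + (k : Int) < folds - 1 := by omega
    rw [if_pos hlt]
    have hs : ((0 : Int) + (k : Int)) * fs = ((k * fsN : Nat) : Int) := by
      rw [hfsN]; push_cast; ring
    have he : ((0 : Int) + (k : Int) + 1) * fs = ((k * fsN : Nat) : Int) + ((fsN : Nat) : Int) := by
      rw [hfsN]; push_cast; ring
    rw [hs, he, PySem.List.slice_natCast_add]
  · -- the last block
    have hnlt : ¬ ((0 : Int) + ((fN - 1 : Nat) : Int) < folds - 1) := by omega
    rw [if_neg hnlt]
    have hs : ((0 : Int) + ((fN - 1 : Nat) : Int)) * fs = (((fN - 1) * fsN : Nat) : Int) := by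
      rw [hfsN]; push_cast; ring
    rw [hs, show ((rows.length : Int)) = ((rows.length : Nat) : Int) from rfl,
        PySem.List.slice_natCast]
    congr 1
    apply List.take_of_length_le
    simp

-- ===== VERDICT (by name: the statement is the Claim_ definition above) =====
theorem split_folds_py_spec : Claim_equal_split_folds_py := by
  intro rows folds _
  unfold Spec_split_folds_py
  by_cases h : folds ≤ 1 ∨ (rows.length : Int) = 0
  · have h' : folds ≤ 1 ∨ rows = [] := by
      rcases h with h | h
      · exact Or.inl h
      · exact Or.inr (List.length_eq_zero_iff.mp (by exact_mod_cast h))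
    unfold split_folds_py split_folds_py_alt
    rcases h' with h' | h' <;> simp [h']
  · push Not at h
    exact pv_main rows folds (by omega) (fun he => h.2 (by simp [he]))
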